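-- pv_equiv track=rewrite | github.com/ezraedl/real-estate-crm-scraper | temp/debug_scripts/analyze_scoring_methods.py | _score_special_sale_types
-- ===== SOURCE A (Python) =====
-- from typing import Dict, List, Any, Optional
--
-- def _score_special_sale_types(analysis_data: Dict[str, Any]) -> tuple[float, str]:
--     """Score special sale types (0-10 points)"""
--     sale_types = analysis_data.get('special_sale_types', [])
--     if 'auction' in sale_types or 'reo' in sale_types:
--         type_str = '/'.join([st for st in sale_types if st in ['auction', 'reo']])
--         return 10, f"Special sale type: {type_str} (+10 points)"
--     elif 'probate' in sale_types:
--         return 8, f"Special sale type: probate (+8 points)"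
--     elif 'short_sale' in sale_types:
--         return 6, f"Special sale type: short_sale (+6 points)"
--     elif 'as_is' in sale_types:
--         return 4, f"Special sale type: as_is (+4 points)"
--     return 0, ""
-- ===== SOURCE B (Python) =====
-- def _score_special_sale_types(analysis_data):
--     """Score special sale types (0-10 points): one pass computing the max score and collecting top-tier matches."""
--     sale_types = analysis_data.get('special_sale_types', [])
--     SCORE = {'auction': 10, 'reo': 10, 'probate': 8, 'short_sale': 6, 'as_is': 4}
--     NAME = {8: 'probate', 6: 'short_sale', 4: 'as_is'}
--     best = 0
--     top = []
--     for st in sale_types: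
--         s = SCORE.get(st, 0)
--         if s > best:
--             best = s
--         if s == 10:
--             top.append(st)
--     if best == 0:
--         return 0, ""
--     name = '/'.join(top) if best == 10 else NAME[best]
--     return best, f"Special sale type: {name} (+{best} points)"
-- ===== Notes on version B (the rewrite author's own statement) =====
-- stated objective: alternative
-- what changed: Replaces A's priority if/elif chain of repeated membership scans by a single pass over sale_types that computes the maximum score from a score dictionary while collecting the top-tier matches, then formats one message from the result.
import Mathlib
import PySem

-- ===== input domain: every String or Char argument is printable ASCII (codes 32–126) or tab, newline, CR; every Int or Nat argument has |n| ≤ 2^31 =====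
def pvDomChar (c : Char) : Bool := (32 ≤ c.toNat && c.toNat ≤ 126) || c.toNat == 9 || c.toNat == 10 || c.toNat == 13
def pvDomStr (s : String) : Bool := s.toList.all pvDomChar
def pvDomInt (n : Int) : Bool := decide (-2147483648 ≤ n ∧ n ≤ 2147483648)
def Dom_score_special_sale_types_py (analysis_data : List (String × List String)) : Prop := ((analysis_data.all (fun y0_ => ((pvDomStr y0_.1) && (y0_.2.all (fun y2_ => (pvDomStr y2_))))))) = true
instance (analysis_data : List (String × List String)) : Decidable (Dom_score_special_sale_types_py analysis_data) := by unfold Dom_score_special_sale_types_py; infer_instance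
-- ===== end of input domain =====

-- B replaces A's priority if/elif chain of repeated membership scans by one pass over sale_types
-- that computes the maximum score from a score table while collecting the top-tier matches (alternative decomposition, same cost).

-- shared by both ports: dict.get('special_sale_types', []) on the association list (first matching key, else default)
def pvGetSaleTypes (analysis_data : List (String × List String)) : List String :=
  ((analysis_data.find? (fun p => p.1 == "special_sale_types")).map (·.2)).getD []

-- ===== PORT A =====
def score_special_sale_types_py (analysis_data : List (String × List String)) : Int × String :=
  let sale_types := pvGetSaleTypes analysis_data
  if sale_types.contains "auction" || sale_types.contains "reo" then
    let type_str := PySem.Str.join "/" (sale_types.filter (fun st => (["auction", "reo"] : List String).contains st))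
    (10, "Special sale type: " ++ type_str ++ " (+10 points)")
  else if sale_types.contains "probate" then
    (8, "Special sale type: probate (+8 points)")
  else if sale_types.contains "short_sale" then
    (6, "Special sale type: short_sale (+6 points)")
  else if sale_types.contains "as_is" then
    (4, "Special sale type: as_is (+4 points)")
  else
    (0, "")

-- ===== PORT B =====
-- the SCORE and NAME dict literals (distinct keys, insertion order)
def pvScoreDict : PySem.Dict String Int :=
  PySem.Dict.mk [("auction", 10), ("reo", 10), ("probate", 8), ("short_sale", 6), ("as_is", 4)]
def pvNameDict : PySem.Dict Int String :=
  PySem.Dict.mk [(8, "probate"), (6, "short_sale"), (4, "as_is")]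

-- loop body: s = SCORE.get(st, 0); if s > best: best = s; if s == 10: top.append(st)
def pvStep (acc : Int × List String) (st : String) : Int × List String :=
  let s := PySem.Dict.getD pvScoreDict st 0
  (if s > acc.1 then s else acc.1, if s == 10 then acc.2 ++ [st] else acc.2)

def score_special_sale_types_py_alt (analysis_data : List (String × List String)) : Int × String :=
  let sale_types := pvGetSaleTypes analysis_data
  let bt := sale_types.foldl pvStep (0, [])
  if bt.1 == 0 then (0, "")
  else
    -- NAME[best]: the KeyError branch (get? = none) is unreachable, best ∈ {4, 6, 8} here
    let name := if bt.1 == 10 then PySem.Str.join "/" bt.2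
                else (PySem.Dict.get? pvNameDict bt.1).getD ""
    (bt.1, "Special sale type: " ++ name ++ " (+" ++ PySem.Int.toStr bt.1 ++ " points)")

-- ===== PRECONDITION & SPEC =====
def Spec_score_special_sale_types_py (analysis_data : List (String × List String)) (out : Int × String) : Prop := out = score_special_sale_types_py_alt analysis_data
instance (analysis_data : List (String × List String)) (out : Int × String) : Decidable (Spec_score_special_sale_types_py analysis_data out) := by unfold Spec_score_special_sale_types_py; infer_instance

-- ===== CLAIM (what is proved, stated in full; the proofs are below) =====
def Claim_equal_score_special_sale_types_py : Prop := ∀ (analysis_data : List (String × List String)), Dom_score_special_sale_types_py analysis_data → Spec_score_special_sale_types_py analysis_data (score_special_sale_types_py analysis_data)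

-- ===== LEMMAS AND PROOFS =====

-- the score of one entry, by cases on which key it is
theorem pv_sc_eq (st : String) : PySem.Dict.getD pvScoreDict st 0 =
    if "auction" = st then 10 else if "reo" = st then 10 else if "probate" = st then 8
    else if "short_sale" = st then 6 else if "as_is" = st then 4 else 0 := by
  simp only [pvScoreDict, PySem.Dict.getD, PySem.Dict.get?_mk_cons, beq_iff_eq]
  by_cases h1 : "auction" = st <;> by_cases h2 : "reo" = st <;> by_cases h3 : "probate" = st <;>
    by_cases h4 : "short_sale" = st <;> by_cases h5 : "as_is" = st <;>
    simp [h1, h2, h3, h4, h5, PySem.Dict.get?]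

theorem pv_sc_bounds (st : String) : 0 ≤ PySem.Dict.getD pvScoreDict st 0 ∧ PySem.Dict.getD pvScoreDict st 0 ≤ 10 := by
  rw [pv_sc_eq]; split_ifs <;> omega

-- the fold splits into the running maximum and the collected top-tier matches
theorem pv_fold_eq (sts : List String) : ∀ b t, sts.foldl pvStep (b, t) =
    (sts.foldl (fun b st => if PySem.Dict.getD pvScoreDict st 0 > b then PySem.Dict.getD pvScoreDict st 0 else b) b,
     t ++ sts.filter (fun st => PySem.Dict.getD pvScoreDict st 0 == 10)) := by
  induction sts with
  | nil => simp
  | cons a l ih =>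
    intro b t
    simp only [List.foldl_cons, pvStep, List.filter_cons]
    by_cases h : PySem.Dict.getD pvScoreDict a 0 == 10 <;> simp [h, ih]

-- the running maximum: lower/upper bounds and attainment
theorem pv_M_ge_init (sts : List String) : ∀ b : Int,
    b ≤ sts.foldl (fun b st => if PySem.Dict.getD pvScoreDict st 0 > b then PySem.Dict.getD pvScoreDict st 0 else b) b := by
  induction sts with
  | nil => intro b; simp
  | cons a l ih =>
    intro b
    refine le_trans ?_ (ih _)
    dsimp only; split <;> omega

theorem pv_M_mem (sts : List String) (st : String) (h : st ∈ sts) : ∀ b : Int,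
    PySem.Dict.getD pvScoreDict st 0 ≤ sts.foldl (fun b st => if PySem.Dict.getD pvScoreDict st 0 > b then PySem.Dict.getD pvScoreDict st 0 else b) b := by
  induction sts with
  | nil => cases h
  | cons a l ih =>
    intro b
    rcases List.mem_cons.mp h with rfl | hmem
    · simp only [List.foldl_cons]
      refine le_trans ?_ (pv_M_ge_init l _)
      dsimp only; split <;> omega
    · exact ih hmem _

theorem pv_M_le (sts : List String) : ∀ b k : Int, b ≤ k → (∀ st ∈ sts, PySem.Dict.getD pvScoreDict st 0 ≤ k) →
    sts.foldl (fun b st => if PySem.Dict.getD pvScoreDict st 0 > b then PySem.Dict.getD pvScoreDict st 0 else b) b ≤ k := by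
  induction sts with
  | nil => intro b k hb _; simpa using hb
  | cons a l ih =>
    intro b k hb hall
    simp only [List.foldl_cons]
    refine ih _ _ ?_ (fun st hst => hall st (List.mem_cons_of_mem _ hst))
    have := hall a (List.mem_cons_self)
    split <;> omega

-- membership characterisations of the maximum at each score level
theorem pv_M10 (sts : List String) (h : "auction" ∈ sts ∨ "reo" ∈ sts) :
    sts.foldl (fun b st => if PySem.Dict.getD pvScoreDict st 0 > b then PySem.Dict.getD pvScoreDict st 0 else b) 0 = 10 := by
  refine le_antisymm (pv_M_le sts 0 10 (by omega) (fun st _ => (pv_sc_bounds st).2)) ?_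
  rcases h with h | h
  · have := pv_M_mem sts "auction" h 0; rw [pv_sc_eq] at this; simpa using this
  · have := pv_M_mem sts "reo" h 0; rw [pv_sc_eq] at this
    by_cases hx : "auction" = "reo" <;> simp [hx] at this <;> omega

theorem pv_M8 (sts : List String) (ha : "auction" ∉ sts) (hr : "reo" ∉ sts) (hp : "probate" ∈ sts) :
    sts.foldl (fun b st => if PySem.Dict.getD pvScoreDict st 0 > b then PySem.Dict.getD pvScoreDict st 0 else b) 0 = 8 := by
  refine le_antisymm (pv_M_le sts 0 8 (by omega) ?_) ?_
  · intro st hst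
    rw [pv_sc_eq]
    split_ifs with h1 h2 <;> try omega
    · exact absurd (h1 ▸ hst) ha
    · exact absurd (h2 ▸ hst) hr
  · have := pv_M_mem sts "probate" hp 0; rw [pv_sc_eq] at this; simpa using this

theorem pv_M6 (sts : List String) (ha : "auction" ∉ sts) (hr : "reo" ∉ sts) (hp : "probate" ∉ sts) (hs : "short_sale" ∈ sts) :
    sts.foldl (fun b st => if PySem.Dict.getD pvScoreDict st 0 > b then PySem.Dict.getD pvScoreDict st 0 else b) 0 = 6 := by
  refine le_antisymm (pv_M_le sts 0 6 (by omega) ?_) ?_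
  · intro st hst
    rw [pv_sc_eq]
    split_ifs with h1 h2 h3 <;> try omega
    · exact absurd (h1 ▸ hst) ha
    · exact absurd (h2 ▸ hst) hr
    · exact absurd (h3 ▸ hst) hp
  · have := pv_M_mem sts "short_sale" hs 0; rw [pv_sc_eq] at this; simpa using this

theorem pv_M4 (sts : List String) (ha : "auction" ∉ sts) (hr : "reo" ∉ sts) (hp : "probate" ∉ sts) (hs : "short_sale" ∉ sts) (hi : "as_is" ∈ sts) :
    sts.foldl (fun b st => if PySem.Dict.getD pvScoreDict st 0 > b then PySem.Dict.getD pvScoreDict st 0 else b) 0 = 4 := by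
  refine le_antisymm (pv_M_le sts 0 4 (by omega) ?_) ?_
  · intro st hst
    rw [pv_sc_eq]
    split_ifs with h1 h2 h3 h4 <;> try omega
    · exact absurd (h1 ▸ hst) ha
    · exact absurd (h2 ▸ hst) hr
    · exact absurd (h3 ▸ hst) hp
    · exact absurd (h4 ▸ hst) hs
  · have := pv_M_mem sts "as_is" hi 0; rw [pv_sc_eq] at this; simpa using this

theorem pv_M0 (sts : List String) (ha : "auction" ∉ sts) (hr : "reo" ∉ sts) (hp : "probate" ∉ sts) (hs : "short_sale" ∉ sts) (hi : "as_is" ∉ sts) :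
    sts.foldl (fun b st => if PySem.Dict.getD pvScoreDict st 0 > b then PySem.Dict.getD pvScoreDict st 0 else b) 0 = 0 := by
  refine le_antisymm (pv_M_le sts 0 0 (by omega) ?_) (pv_M_ge_init sts 0)
  intro st hst
  rw [pv_sc_eq]
  split_ifs with h1 h2 h3 h4 h5 <;> try omega
  · exact absurd (h1 ▸ hst) ha
  · exact absurd (h2 ▸ hst) hr
  · exact absurd (h3 ▸ hst) hp
  · exact absurd (h4 ▸ hst) hs
  · exact absurd (h5 ▸ hst) hi

-- the two filter predicates agree
theorem pv_pred10 : (fun st => PySem.Dict.getD pvScoreDict st 0 == 10) = (fun st => (["auction", "reo"] : List String).contains st) := by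
  funext st
  rw [pv_sc_eq]
  by_cases h1 : "auction" = st <;> by_cases h2 : "reo" = st <;>
    simp [h1, h2, List.contains_eq_mem, List.mem_cons, eq_comm (a := st)]
  all_goals split_ifs <;> omega

-- the core equality, on the sale_types list
theorem pv_main (sts : List String) :
    (if sts.contains "auction" || sts.contains "reo" then
      ((10 : Int), "Special sale type: " ++ PySem.Str.join "/" (sts.filter (fun st => (["auction", "reo"] : List String).contains st)) ++ " (+10 points)")
    else if sts.contains "probate" then (8, "Special sale type: probate (+8 points)")
    else if sts.contains "short_sale" then (6, "Special sale type: short_sale (+6 points)")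
    else if sts.contains "as_is" then (4, "Special sale type: as_is (+4 points)")
    else (0, "")) =
    (let bt := sts.foldl pvStep (0, [])
     if bt.1 == 0 then ((0 : Int), "")
     else
       let name := if bt.1 == 10 then PySem.Str.join "/" bt.2
                   else (PySem.Dict.get? pvNameDict bt.1).getD ""
       (bt.1, "Special sale type: " ++ name ++ " (+" ++ PySem.Int.toStr bt.1 ++ " points)")) := by
  rw [pv_fold_eq sts 0 []]
  simp only [List.nil_append]
  by_cases h10 : "auction" ∈ sts ∨ "reo" ∈ sts
  · rw [pv_M10 sts h10]
    have hc : (sts.contains "auction" || sts.contains "reo") = true := by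
      rcases h10 with h | h <;> simp [List.contains_eq_mem, h]
    rw [if_pos hc]
    simp only [pv_pred10]
    norm_num
    simp only [String.append_assoc]
    congr 2
  · rw [not_or] at h10
    obtain ⟨ha, hr⟩ := h10
    have hc : ¬ ((sts.contains "auction" || sts.contains "reo") = true) := by
      simp [List.contains_eq_mem, ha, hr]
    rw [if_neg hc]
    by_cases hp : "probate" ∈ sts
    · rw [pv_M8 sts ha hr hp, if_pos (by simpa [List.contains_eq_mem] using hp),
        if_neg (by decide : ¬ ((((8:Int)) == 0) = true)), if_neg (by decide : ¬ ((((8:Int)) == 10) = true))]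
      decide
    · rw [if_neg (by simpa [List.contains_eq_mem] using hp)]
      by_cases hs : "short_sale" ∈ sts
      · rw [pv_M6 sts ha hr hp hs, if_pos (by simpa [List.contains_eq_mem] using hs),
          if_neg (by decide : ¬ ((((6:Int)) == 0) = true)), if_neg (by decide : ¬ ((((6:Int)) == 10) = true))]
        decide
      · rw [if_neg (by simpa [List.contains_eq_mem] using hs)]
        by_cases hi : "as_is" ∈ sts
        · rw [pv_M4 sts ha hr hp hs hi, if_pos (by simpa [List.contains_eq_mem] using hi),
            if_neg (by decide : ¬ ((((4:Int)) == 0) = true)), if_neg (by decide : ¬ ((((4:Int)) == 10) = true))]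
          decide
        · rw [if_neg (by simpa [List.contains_eq_mem] using hi), pv_M0 sts ha hr hp hs hi,
            if_pos (by decide : ((((0:Int)) == 0) = true))]

-- ===== VERDICT (by name: the statement is the Claim_ definition above) =====
theorem score_special_sale_types_py_spec : Claim_equal_score_special_sale_types_py := by
  intro ad _
  unfold Spec_score_special_sale_types_py score_special_sale_types_py score_special_sale_types_py_alt pvGetSaleTypes
  exact pv_main _
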